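-- pv_equiv track=rewrite | github.com/zl827154659/AnswerExtract | data_process.py | label_tagging
-- ===== SOURCE A (Python) =====
-- def label_tagging(context_list):
--     answer_flag = False
--     label_list = []
--     final_token_list = []
--     first_flag = False
--     for index, token in enumerate(context_list):
--         if token != '[SEP]' and not answer_flag:
--             label_list.append('O')
--             final_token_list.append(token)
--         elif token == '[SEP]' and not answer_flag:
--             answer_flag = True
--             first_flag = True
--         elif token != '[SEP]' and answer_flag and first_flag:
--             label_list.append('B-MISC')
--             final_token_list.append(token)
--             first_flag = False
--         elif token != '[SEP]' and answer_flag and not first_flag: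
--             label_list.append('I-MISC')
--             final_token_list.append(token)
--         elif token == '[SEP]' and answer_flag:
--             answer_flag = False
--             first_flag = False
--     assert len(final_token_list) == len(label_list)
--     return final_token_list, label_list
-- ===== SOURCE B (Python) =====
-- def label_tagging(context_list):
--     # Partition into segments separated by '[SEP]'; even segments are outside
--     # answers ('O'), odd segments are answers ('B-MISC' then 'I-MISC').
--     segments = []
--     current = []
--     for token in context_list:
--         if token == '[SEP]':
--             segments.append(current)
--             current = []
--         else:
--             current.append(token)
--     segments.append(current)
--     final_token_list = []
--     label_list = []
--     for i, seg in enumerate(segments):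
--         final_token_list += seg
--         if i % 2 == 0:
--             label_list += ['O'] * len(seg)
--         else:
--             label_list += ['B-MISC' if j == 0 else 'I-MISC' for j in range(len(seg))]
--     assert len(final_token_list) == len(label_list)
--     return final_token_list, label_list
-- ===== Notes on version B (the rewrite author's own statement) =====
-- stated objective: simpler
-- what changed: Replaces A's single loop over two mutable boolean flags (answer_flag/first_flag) by a split-on-'[SEP]' pass into segments followed by parity-indexed labelling of each segment (even: 'O'; odd: 'B-MISC' then 'I-MISC').
import Mathlib
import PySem

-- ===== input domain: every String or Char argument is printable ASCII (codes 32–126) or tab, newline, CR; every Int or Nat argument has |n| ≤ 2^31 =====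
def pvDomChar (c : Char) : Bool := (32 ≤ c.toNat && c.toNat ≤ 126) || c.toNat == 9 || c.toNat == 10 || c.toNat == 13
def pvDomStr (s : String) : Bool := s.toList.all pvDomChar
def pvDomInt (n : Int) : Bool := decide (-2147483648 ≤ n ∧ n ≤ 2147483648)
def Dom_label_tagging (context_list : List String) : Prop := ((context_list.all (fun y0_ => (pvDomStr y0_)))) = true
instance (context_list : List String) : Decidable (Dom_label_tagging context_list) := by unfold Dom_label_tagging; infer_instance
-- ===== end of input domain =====

-- B replaces A's two boolean state flags by a split-into-segments pass followed by
-- parity-indexed labelling (even segments 'O', odd segments 'B-MISC'/'I-MISC'); objective: simpler decomposition.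

-- ===== PORT A =====
-- one step of A's for-loop; state = (answer_flag, label_list, final_token_list, first_flag)
def stepA (st : Bool × List String × List String × Bool) (p : Int × String) :
    Bool × List String × List String × Bool :=
  let (answer_flag, label_list, final_token_list, first_flag) := st
  let token := p.2
  if (token != "[SEP]") && !answer_flag then
    (answer_flag, label_list ++ ["O"], final_token_list ++ [token], first_flag)
  else if (token == "[SEP]") && !answer_flag then
    (true, label_list, final_token_list, true)
  else if (token != "[SEP]") && answer_flag && first_flag then
    (answer_flag, label_list ++ ["B-MISC"], final_token_list ++ [token], false)
  else if (token != "[SEP]") && answer_flag && !first_flag then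
    (answer_flag, label_list ++ ["I-MISC"], final_token_list ++ [token], first_flag)
  else if (token == "[SEP]") && answer_flag then
    (false, label_list, final_token_list, false)
  else st

def label_tagging (context_list : List String) : List String × List String :=
  let fin := (PySem.List.enumerate context_list 0).foldl stepA (false, [], [], false)
  -- the assert len(final_token_list) == len(label_list) always holds; A then returns
  (fin.2.2.1, fin.2.1)

-- ===== PORT B =====
-- first loop of B: split on '[SEP]'; state = (segments, current)
def stepSplit (acc : List (List String) × List String) (token : String) :
    List (List String) × List String :=
  if token == "[SEP]" then (acc.1 ++ [acc.2], []) else (acc.1, acc.2 ++ [token])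

-- second loop of B: parity-indexed labelling; state = (final_token_list, label_list)
def stepB (acc : List String × List String) (q : Int × List String) :
    List String × List String :=
  let i := q.1
  let seg := q.2
  if i % 2 = 0 then (acc.1 ++ seg, acc.2 ++ seg.map (fun _ => "O"))
  else (acc.1 ++ seg, acc.2 ++ (List.range seg.length).map (fun j => if j = 0 then "B-MISC" else "I-MISC"))

def label_tagging_alt (context_list : List String) : List String × List String :=
  let p := context_list.foldl stepSplit ([], [])
  let segments := p.1 ++ [p.2]
  (PySem.List.enumerate segments 0).foldl stepB ([], [])

-- ===== PRECONDITION & SPEC =====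
def Spec_label_tagging (context_list : List String) (out : List String × List String) : Prop := out = label_tagging_alt context_list
instance (context_list : List String) (out : List String × List String) : Decidable (Spec_label_tagging context_list out) := by unfold Spec_label_tagging; infer_instance

-- ===== CLAIM (what is proved, stated in full; the proofs are below) =====
def Claim_equal_label_tagging : Prop := ∀ (context_list : List String), Dom_label_tagging context_list → Spec_label_tagging context_list (label_tagging context_list)

-- ===== LEMMAS AND PROOFS =====

-- A's loop as a clean structural recursion returning (tokens, labels)
def runA : Bool → Bool → List String → List String × List String
  | _, _, [] => ([], [])
  | af, ff, t :: ts =>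
    if t = "[SEP]" then (if af then runA false false ts else runA true true ts)
    else if af then
      (if ff then
        let r := runA true false ts; (t :: r.1, "B-MISC" :: r.2)
      else
        let r := runA true false ts; (t :: r.1, "I-MISC" :: r.2))
    else
      let r := runA false ff ts; (t :: r.1, "O" :: r.2)

-- recursive split on '[SEP]'
def splitRec : List String → List (List String)
  | [] => [[]]
  | t :: ts =>
    if t = "[SEP]" then [] :: splitRec ts
    else
      match splitRec ts with
      | [] => [[t]]
      | s :: rest => (t :: s) :: rest

def oddLabels (s : List String) : List String :=
  (List.range s.length).map (fun j => if j = 0 then "B-MISC" else "I-MISC")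

-- segment-wise processing; oddQ = current segment has odd index
def proc : Bool → List (List String) → List String × List String
  | _, [] => ([], [])
  | oddQ, s :: ss =>
    let r := proc (!oddQ) ss
    (s ++ r.1, (if oddQ then oddLabels s else s.map (fun _ => "O")) ++ r.2)

-- processing when in the middle of an odd segment (all remaining labels 'I-MISC')
def procMid : List (List String) → List String × List String
  | [] => ([], [])
  | s :: ss =>
    let r := proc false ss
    (s ++ r.1, s.map (fun _ => "I-MISC") ++ r.2)

def mapHead (f : List String → List String) : List (List String) → List (List String)
  | [] => []
  | x :: xs => f x :: xs

theorem splitRec_ne_nil (l : List String) : splitRec l ≠ [] := by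
  cases l with
  | nil => simp [splitRec]
  | cons t ts =>
    simp only [splitRec]
    split
    · simp
    · cases h : splitRec ts <;> simp

theorem A_fold (l : List String) : ∀ (i : Int) (af ff : Bool) (lb tk : List String),
    (let fin := (PySem.List.enumerate l i).foldl stepA (af, lb, tk, ff)
     (fin.2.2.1, fin.2.1)) = (tk ++ (runA af ff l).1, lb ++ (runA af ff l).2) := by
  induction l with
  | nil => intro i af ff lb tk; simp [PySem.List.enumerate_nil, runA]
  | cons t ts ih =>
    intro i af ff lb tk
    simp only [PySem.List.enumerate_cons, List.foldl_cons]
    by_cases hs : t = "[SEP]" <;> cases af <;> cases ff <;>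
      simp [stepA, hs, runA, ih, List.append_assoc]

theorem split_fold (l : List String) : ∀ (segs : List (List String)) (cur : List String),
    (let p := l.foldl stepSplit (segs, cur); p.1 ++ [p.2])
      = segs ++ mapHead (cur ++ ·) (splitRec l) := by
  induction l with
  | nil => intro segs cur; simp [splitRec, mapHead]
  | cons t ts ih =>
    intro segs cur
    by_cases hs : t = "[SEP]"
    · subst hs
      simp only [List.foldl_cons, stepSplit, BEq.rfl, if_true]
      rw [ih (segs ++ [cur]) []]
      cases hsp : splitRec ts with
      | nil => exact absurd hsp (splitRec_ne_nil ts)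
      | cons s rest => simp [splitRec, mapHead, hsp]
    · simp only [List.foldl_cons, stepSplit, beq_iff_eq, hs, if_false]
      rw [ih segs (cur ++ [t])]
      cases hsp : splitRec ts with
      | nil => exact absurd hsp (splitRec_ne_nil ts)
      | cons s rest => simp [splitRec, hs, mapHead, hsp, List.append_assoc]

theorem oddLabels_cons (t : String) (s : List String) :
    oddLabels (t :: s) = "B-MISC" :: s.map (fun _ => "I-MISC") := by
  have h1 : (List.range s.length).map ((fun j => if j = 0 then "B-MISC" else "I-MISC") ∘ Nat.succ)
      = List.replicate s.length "I-MISC" := by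
    rw [show ((fun j => if j = 0 then "B-MISC" else "I-MISC") ∘ Nat.succ) = (fun _ => "I-MISC")
          from funext (by simp)]
    simp [List.map_const']
  have h2 : s.map (fun _ => "I-MISC") = List.replicate s.length "I-MISC" := by
    simp [List.map_const']
  simp only [oddLabels, List.length_cons, List.range_succ_eq_map, List.map_cons, List.map_map,
    h1, h2]
  simp

theorem tag_fold (segs : List (List String)) : ∀ (k : Nat) (acc : List String × List String),
    (PySem.List.enumerate segs (k : Int)).foldl stepB acc
      = (acc.1 ++ (proc (decide (k % 2 = 1)) segs).1, acc.2 ++ (proc (decide (k % 2 = 1)) segs).2) := by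
  induction segs with
  | nil => intro k acc; simp [PySem.List.enumerate_nil, proc]
  | cons s ss ih =>
    intro k acc
    have hcast : ((k : Int) + 1) = ((k + 1 : Nat) : Int) := by push_cast; ring
    have hmod : ((k : Int) % 2 = 0) ↔ ¬ (k % 2 = 1) := by
      have : ((k : Int) % 2) = ((k % 2 : Nat) : Int) := by push_cast; ring
      rw [this]; omega
    simp only [PySem.List.enumerate_cons, List.foldl_cons, hcast, ih]
    by_cases hk : k % 2 = 1
    · have hk1 : ¬ ((k + 1) % 2 = 1) := by omega
      simp [stepB, proc, hmod, hk, hk1, oddLabels, List.append_assoc]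
    · have hk1 : (k + 1) % 2 = 1 := by omega
      simp [stepB, proc, hmod, hk, hk1, List.append_assoc]

theorem core (l : List String) :
    (∀ ff, runA false ff l = proc false (splitRec l)) ∧
      runA true true l = proc true (splitRec l) ∧
      runA true false l = procMid (splitRec l) := by
  induction l with
  | nil => simp [runA, splitRec, proc, procMid, oddLabels]
  | cons t ts ih =>
    obtain ⟨ih1, ih2, ih3⟩ := ih
    by_cases hs : t = "[SEP]"
    · refine ⟨?_, ?_, ?_⟩ <;>
        simp [runA, splitRec, hs, proc, procMid, ih1, ih2, oddLabels]
    · cases hsp : splitRec ts with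
      | nil => exact absurd hsp (splitRec_ne_nil ts)
      | cons s rest =>
        refine ⟨?_, ?_, ?_⟩
        · intro ff
          simp [runA, splitRec, hs, hsp, proc, ih1 ff]
        · simp [runA, splitRec, hs, hsp, proc, procMid, ih3, oddLabels_cons]
        · simp [runA, splitRec, hs, hsp, procMid, ih3]

theorem mapHead_id (l : List (List String)) : mapHead (fun x => x) l = l := by
  cases l <;> simp [mapHead]

theorem A_eq_runA (cl : List String) : label_tagging cl = runA false false cl := by
  have h := A_fold cl 0 false false [] []
  simpa [label_tagging] using h

theorem B_eq_proc (cl : List String) : label_tagging_alt cl = proc false (splitRec cl) := by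
  have hsplit := split_fold cl [] []
  simp only [List.nil_append, mapHead_id] at hsplit
  have htag := tag_fold (splitRec cl) 0 ([], [])
  simp only [label_tagging_alt]
  simp only [hsplit]
  simpa using htag

-- ===== VERDICT (by name: the statement is the Claim_ definition above) =====
theorem label_tagging_spec : Claim_equal_label_tagging := by
  intro cl _
  show label_tagging cl = label_tagging_alt cl
  rw [A_eq_runA, B_eq_proc]
  exact (core cl).1 false
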